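-- pv_equiv track=rewrite | github.com/shuowenwei/LeetCodePython | OutOfBag/Robinhood/BS_rebalance.py | solution
-- ===== SOURCE A (Python) =====
-- def solution(transactions):
--     num_B = 0
--     res_no_extra_S = ''
--     # the first pass: remmove extra 'S'
--     for char in transactions:
--         if char == 'B':
--             num_B += 1
--         if char == 'S':
--             if num_B == 0:
--                 continue
--             else:
--                 num_B -= 1
--         res_no_extra_S += char
--
--     res_no_extra_B = ''
--     num_S = 0
--     for char in res_no_extra_S[::-1]:
--         if char == 'S':
--             num_S += 1
--         if char == 'B':
--             if num_S == 0:
--                 continue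
--             else:
--                 num_S -= 1
--         res_no_extra_B += char
--
--     return res_no_extra_B[::-1]
-- ===== SOURCE B (Python) =====
-- def solution(transactions):
--     out = []
--     pend = []  # stack of chunks, each chunk starts with an unmatched 'B'
--     for ch in transactions:
--         if ch == 'B':
--             pend.append(['B'])
--         elif ch == 'S':
--             if pend:
--                 top = pend.pop()
--                 top.append('S')
--                 (pend[-1] if pend else out).extend(top)
--             # unmatched 'S' is dropped
--         else:
--             (pend[-1] if pend else out).append(ch)
--     for chunk in pend:  # leftover unmatched 'B's: drop the leading 'B', keep the rest
--         out.extend(chunk[1:])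
--     return ''.join(out)
-- ===== Notes on version B (the rewrite author's own statement) =====
-- stated objective: alternative
-- what changed: A's two directional counting passes (forward removing extra 'S', then a pass over the reversed string removing extra 'B') are replaced by a single forward pass maintaining a stack of pending 'B'-chunks that are merged on a matching 'S', leftover chunks losing their leading 'B' at the end.
import Mathlib
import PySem

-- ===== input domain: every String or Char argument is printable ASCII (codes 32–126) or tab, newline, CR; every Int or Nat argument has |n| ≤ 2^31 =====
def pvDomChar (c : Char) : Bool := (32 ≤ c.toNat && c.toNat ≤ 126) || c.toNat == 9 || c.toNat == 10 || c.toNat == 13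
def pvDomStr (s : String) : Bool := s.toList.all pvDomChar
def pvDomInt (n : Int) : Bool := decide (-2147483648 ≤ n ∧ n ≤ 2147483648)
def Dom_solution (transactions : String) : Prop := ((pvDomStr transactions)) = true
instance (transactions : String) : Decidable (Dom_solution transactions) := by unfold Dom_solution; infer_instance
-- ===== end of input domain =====

-- B replaces A's two directional counting passes by one forward pass with a stack of pending 'B'-chunks (alternative decomposition; same cost).

-- ===== PORT A =====
-- first pass: remove extra 'S' (num_B counts unmatched 'B's so far)
def pvStep1 (st : Int × List Char) (c : Char) : Int × List Char :=
  let numB := if c = 'B' then st.1 + 1 else st.1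
  if c = 'S' then
    if numB = 0 then (numB, st.2)            -- continue: drop this 'S'
    else (numB - 1, st.2 ++ [c])
  else (numB, st.2 ++ [c])

-- second pass over the reversed string: remove extra 'B'
def pvStep2 (st : Int × List Char) (c : Char) : Int × List Char :=
  let numS := if c = 'S' then st.1 + 1 else st.1
  if c = 'B' then
    if numS = 0 then (numS, st.2)            -- continue: drop this 'B'
    else (numS - 1, st.2 ++ [c])
  else (numS, st.2 ++ [c])

def solution (transactions : String) : String :=
  -- pass 1, then pass 2 over res_no_extra_S[::-1], then [::-1] again
  String.ofList (((transactions.toList.foldl pvStep1 (0, [])).2.reverse.foldl pvStep2 (0, [])).2.reverse)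

-- ===== PORT B =====
-- state: (out, pend); pend is the stack of pending chunks, TOP AT THE HEAD
-- (Python keeps the top at the end of the list; head-cons is the same stack)
def pvStepAlt (st : List Char × List (List Char)) (c : Char) : List Char × List (List Char) :=
  match st with
  | (out, pend) =>
    if c = 'B' then (out, ['B'] :: pend)                      -- pend.append(['B'])
    else if c = 'S' then
      match pend with
      | [] => (out, [])                                       -- unmatched 'S' dropped
      | top :: rest =>
        match rest with
        | [] => (out ++ top ++ ['S'], [])                     -- out.extend(top + ['S'])
        | t2 :: r2 => (out, (t2 ++ top ++ ['S']) :: r2)       -- pend[-1].extend(top + ['S'])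
    else
      match pend with
      | [] => (out ++ [c], [])
      | top :: rest => (out, (top ++ [c]) :: rest)

def solution_alt (transactions : String) : String :=
  -- after the fold: for chunk in pend (bottom of the stack first): out.extend(chunk[1:])
  String.ofList ((transactions.toList.foldl pvStepAlt ([], [])).1 ++
    (((transactions.toList.foldl pvStepAlt ([], [])).2.reverse.map
      (fun ch => PySem.List.slice ch (some 1) none)).flatten))

-- ===== PRECONDITION & SPEC =====
def Spec_solution (transactions : String) (out : String) : Prop := out = solution_alt transactions
instance (transactions : String) (out : String) : Decidable (Spec_solution transactions out) := by unfold Spec_solution; infer_instance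

-- ===== CLAIM (what is proved, stated in full; the proofs are below) =====
def Claim_equal_solution : Prop := ∀ (transactions : String), Dom_solution transactions → Spec_solution transactions (solution transactions)

-- ===== LEMMAS AND PROOFS =====

-- "balanced" for pass 2: folding pvStep2 over w.reverse keeps any nonnegative counter and keeps every char
def pvBal (w : List Char) : Prop :=
  ∀ (s : Int) (acc : List Char), 0 ≤ s → w.reverse.foldl pvStep2 (s, acc) = (s, acc ++ w.reverse)

lemma pvBal_nil : pvBal [] := by
  intro s acc _; simp

lemma pvBal_single {c : Char} (hB : c ≠ 'B') (hS : c ≠ 'S') : pvBal [c] := by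
  intro s acc _; simp [pvStep2, hB, hS]

lemma pvBal_append {u v : List Char} (hu : pvBal u) (hv : pvBal v) : pvBal (u ++ v) := by
  intro s acc hs
  rw [List.reverse_append, List.foldl_append, hv s acc hs, hu s _ hs, List.append_assoc,
    ← List.reverse_append]

lemma pvBal_wrap {t : List Char} (ht : pvBal t) : pvBal ('B' :: t ++ ['S']) := by
  intro s acc hs
  have h1 : ('B' :: t ++ ['S']).reverse = 'S' :: (t.reverse ++ ['B']) := by simp
  rw [h1]
  simp only [List.foldl_cons, List.foldl_append]
  have hstep : pvStep2 (s, acc) 'S' = (s + 1, acc ++ ['S']) := by simp [pvStep2]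
  rw [hstep, ht (s + 1) (acc ++ ['S']) (by omega)]
  have : pvStep2 (s + 1, acc ++ ['S'] ++ t.reverse) 'B'
      = (s, acc ++ ['S'] ++ t.reverse ++ ['B']) := by
    simp [pvStep2]; omega
  rw [List.foldl_nil, this]
  simp

-- chunks on the stack are 'B' followed by a balanced tail
def pvGood (pend : List (List Char)) : Prop :=
  ∀ ch ∈ pend, ∃ t, ch = 'B' :: t ∧ pvBal t

-- main invariant: A's first-pass state is determined by B's state
lemma pvMain (l : List Char) : ∀ (out : List Char) (pend : List (List Char)),
    pvBal out → pvGood pend →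
    l.foldl pvStep1 ((pend.length : Int), out ++ pend.reverse.flatten)
      = (((l.foldl pvStepAlt (out, pend)).2.length : Int),
         (l.foldl pvStepAlt (out, pend)).1 ++ (l.foldl pvStepAlt (out, pend)).2.reverse.flatten)
    ∧ pvBal (l.foldl pvStepAlt (out, pend)).1
    ∧ pvGood (l.foldl pvStepAlt (out, pend)).2 := by
  induction l with
  | nil => intro out pend hb hg; exact ⟨rfl, hb, hg⟩
  | cons c l ih =>
    intro out pend hb hg
    simp only [List.foldl_cons]
    by_cases hcB : c = 'B'
    · subst hcB
      have h1 : pvStep1 ((pend.length : Int), out ++ pend.reverse.flatten) 'B'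
          = (((['B'] :: pend).length : Int), out ++ (['B'] :: pend).reverse.flatten) := by
        simp [pvStep1]
      have h2 : pvStepAlt (out, pend) 'B' = (out, ['B'] :: pend) := by simp [pvStepAlt]
      rw [h1, h2]
      refine ih out (['B'] :: pend) hb ?_
      intro ch hch
      rcases List.mem_cons.mp hch with h | h
      · exact ⟨[], by simpa using h, pvBal_nil⟩
      · exact hg ch h
    · by_cases hcS : c = 'S'
      · subst hcS
        match pend with
        | [] =>
          have h1 : pvStep1 ((([] : List (List Char)).length : Int),
              out ++ ([] : List (List Char)).reverse.flatten) 'S' = (0, out) := by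
            simp [pvStep1]
          have h2 : pvStepAlt (out, []) 'S' = (out, []) := by simp [pvStepAlt]
          rw [h1, h2]
          have := ih out [] hb hg
          simpa using this
        | top :: rest =>
          obtain ⟨t, htop, hbt⟩ := hg top (List.mem_cons_self)
          have h1 : pvStep1 (((top :: rest).length : Int), out ++ (top :: rest).reverse.flatten) 'S'
              = ((rest.length : Int), out ++ (top :: rest).reverse.flatten ++ ['S']) := by
            simp only [pvStep1, Char.reduceEq, if_false, if_true, List.length_cons]
            push_cast
            rw [if_neg (show ¬((rest.length : Int) + 1 = 0) by omega)]
            simp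
          rw [h1]
          match rest with
          | [] =>
            have h2 : pvStepAlt (out, [top]) 'S' = (out ++ top ++ ['S'], []) := by
              simp [pvStepAlt]
            rw [h2]
            have hb' : pvBal (out ++ top ++ ['S']) := by
              rw [htop]
              have harr : out ++ 'B' :: t ++ ['S'] = out ++ ('B' :: t ++ ['S']) := by simp
              rw [harr]
              exact pvBal_append hb (pvBal_wrap hbt)
            have := ih (out ++ top ++ ['S']) [] hb' (by intro ch hch; simp at hch)
            have harr : out ++ ([top] : List (List Char)).reverse.flatten ++ ['S']
                = (out ++ top ++ ['S']) ++ ([] : List (List Char)).reverse.flatten := by simp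
            rw [harr]
            simpa using this
          | t2 :: r2 =>
            have h2 : pvStepAlt (out, top :: t2 :: r2) 'S' = (out, (t2 ++ top ++ ['S']) :: r2) := by
              simp [pvStepAlt]
            rw [h2]
            obtain ⟨u, ht2, hbu⟩ := hg t2 (by simp)
            have hg' : pvGood ((t2 ++ top ++ ['S']) :: r2) := by
              intro ch hch
              rcases List.mem_cons.mp hch with h | h
              · refine ⟨u ++ top ++ ['S'], ?_, ?_⟩
                · rw [h, ht2]; simp
                · rw [htop]
                  have harr : u ++ 'B' :: t ++ ['S'] = u ++ ('B' :: t ++ ['S']) := by simp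
                  rw [harr]
                  exact pvBal_append hbu (pvBal_wrap hbt)
              · exact hg ch (by simp [h])
            have harr : out ++ (top :: t2 :: r2).reverse.flatten ++ ['S']
                = out ++ ((t2 ++ top ++ ['S']) :: r2).reverse.flatten := by simp
            have hlen2 : ((t2 :: r2).length : Int) = (((t2 ++ top ++ ['S']) :: r2).length : Int) := by
              simp
            rw [harr, hlen2]
            exact ih out ((t2 ++ top ++ ['S']) :: r2) hb hg'
      · -- ordinary character
        match pend with
        | [] =>
          have h1 : pvStep1 ((([] : List (List Char)).length : Int),
              out ++ ([] : List (List Char)).reverse.flatten) c = (0, out ++ [c]) := by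
            simp [pvStep1, hcB, hcS]
          have h2 : pvStepAlt (out, []) c = (out ++ [c], []) := by simp [pvStepAlt, hcB, hcS]
          rw [h1, h2]
          have := ih (out ++ [c]) [] (pvBal_append hb (pvBal_single hcB hcS))
            (by intro ch hch; simp at hch)
          simpa using this
        | top :: rest =>
          have h1 : pvStep1 (((top :: rest).length : Int), out ++ (top :: rest).reverse.flatten) c
              = (((top :: rest).length : Int), out ++ (top :: rest).reverse.flatten ++ [c]) := by
            simp [pvStep1, hcB, hcS]
          have h2 : pvStepAlt (out, top :: rest) c = (out, (top ++ [c]) :: rest) := by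
            simp [pvStepAlt, hcB, hcS]
          rw [h1, h2]
          obtain ⟨t, htop, hbt⟩ := hg top (List.mem_cons_self)
          have hg' : pvGood ((top ++ [c]) :: rest) := by
            intro ch hch
            rcases List.mem_cons.mp hch with h | h
            · exact ⟨t ++ [c], by rw [h, htop]; simp,
                pvBal_append hbt (pvBal_single hcB hcS)⟩
            · exact hg ch (by simp [h])
          have harr : out ++ (top :: rest).reverse.flatten ++ [c]
              = out ++ ((top ++ [c]) :: rest).reverse.flatten := by simp
          have hlen : ((top :: rest).length : Int) = (((top ++ [c]) :: rest).length : Int) := by simp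
          rw [harr, hlen]
          exact ih out ((top ++ [c]) :: rest) hb hg'

-- pass 2 over the pending chunks (top first) drops exactly each leading 'B'
lemma pvPass2chunks : ∀ (pend : List (List Char)) (acc : List Char), pvGood pend →
    (pend.reverse.flatten).reverse.foldl pvStep2 (0, acc)
      = (0, acc ++ (pend.map (fun ch => ch.tail.reverse)).flatten) := by
  intro pend
  induction pend with
  | nil => intro acc _; simp
  | cons C rest ih =>
    intro acc hg
    obtain ⟨t, hC, hbt⟩ := hg C (List.mem_cons_self)
    have h1 : ((C :: rest).reverse.flatten).reverse
        = (t.reverse ++ ['B']) ++ (rest.reverse.flatten).reverse := by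
      subst hC; simp
    rw [h1, List.foldl_append, List.foldl_append, hbt 0 acc le_rfl]
    have h2 : pvStep2 (0, acc ++ t.reverse) 'B' = (0, acc ++ t.reverse) := by
      simp [pvStep2]
    simp only [List.foldl_cons, List.foldl_nil, h2]
    rw [ih (acc ++ t.reverse) (fun ch hch => hg ch (by simp [hch]))]
    subst hC; simp

lemma pvRevFlat : ∀ (pend : List (List Char)),
    ((pend.map (fun ch => ch.tail.reverse)).flatten).reverse
      = (pend.reverse.map (fun ch => ch.tail)).flatten := by
  intro pend
  induction pend with
  | nil => simp
  | cons C rest ih => simp [ih]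

-- ===== VERDICT (by name: the statement is the Claim_ definition above) =====
theorem solution_spec : Claim_equal_solution := by
  intro transactions _
  unfold Spec_solution solution solution_alt
  obtain ⟨heq, hbo, hgp⟩ := pvMain transactions.toList [] [] pvBal_nil
    (by intro ch hch; simp at hch)
  set st := transactions.toList.foldl pvStepAlt ([], []) with hst
  simp only [List.length_nil, Nat.cast_zero, List.reverse_nil, List.flatten_nil,
    List.append_nil] at heq
  rw [heq]
  have h2 : (st.1 ++ st.2.reverse.flatten).reverse.foldl pvStep2 (0, ([] : List Char))
      = (0, (st.2.map (fun ch => ch.tail.reverse)).flatten ++ st.1.reverse) := by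
    rw [List.reverse_append, List.foldl_append, pvPass2chunks st.2 [] hgp]
    have := hbo 0 ((st.2.map (fun ch => ch.tail.reverse)).flatten) le_rfl
    simpa using this
  rw [h2]
  have h3 : ((st.2.map (fun ch => ch.tail.reverse)).flatten ++ st.1.reverse).reverse
      = st.1 ++ (st.2.reverse.map (fun ch => ch.tail)).flatten := by
    rw [List.reverse_append, List.reverse_reverse, pvRevFlat]
  rw [h3]
  have h4 : st.2.reverse.map (fun ch => ch.tail)
      = st.2.reverse.map (fun ch => PySem.List.slice ch (some 1) none) := by
    apply List.map_congr_left
    intro ch _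
    rw [PySem.List.slice_from_one]
  rw [h4]
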